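-- pv_equiv track=rewrite | github.com/hejo89/advent_of_code | 2020/17/main.py | foo
-- ===== SOURCE A (Python) =====
-- def foo(s):
--     ss = set()
--     for j in s:
--         x, y, z, w = j
--
--         for a in range(-1, 2):
--             for b in range(-1, 2):
--                 for c in range(-1, 2):
--                     for d in range(-1, 2):
--                         t = (x+a, y+b, z+c, w+d)
--                         ss.add(t)
--
--     return ss
-- ===== SOURCE B (Python) =====
-- def shift(p, axis, d):
--     x, y, z, w = p
--     if axis == 0:
--         return (x + d, y, z, w)
--     if axis == 1:
--         return (x, y + d, z, w)
--     if axis == 2: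
--         return (x, y, z + d, w)
--     return (x, y, z, w + d)
--
--
-- def foo(s):
--     # Staged dilation: start from the points themselves, then four passes,
--     # each replacing the set by its union with itself shifted by -1/0/+1
--     # along one single axis (iterated Minkowski sum with {-1,0,1} per axis).
--     S = {(x, y, z, w) for (x, y, z, w) in s}
--     for axis in range(4):
--         S = {shift(p, axis, d) for p in S for d in (-1, 0, 1)}
--     return S
-- ===== Notes on version B (the rewrite author's own statement) =====
-- stated objective: alternative
-- what changed: Instead of enumerating all 81 offsets of {-1,0,1}^4 per point, B dilates the whole set in four staged passes, each replacing the set by its shifts of -1/0/+1 along one single axis (iterated Minkowski sum, 3 shifts per pass).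
import Mathlib
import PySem

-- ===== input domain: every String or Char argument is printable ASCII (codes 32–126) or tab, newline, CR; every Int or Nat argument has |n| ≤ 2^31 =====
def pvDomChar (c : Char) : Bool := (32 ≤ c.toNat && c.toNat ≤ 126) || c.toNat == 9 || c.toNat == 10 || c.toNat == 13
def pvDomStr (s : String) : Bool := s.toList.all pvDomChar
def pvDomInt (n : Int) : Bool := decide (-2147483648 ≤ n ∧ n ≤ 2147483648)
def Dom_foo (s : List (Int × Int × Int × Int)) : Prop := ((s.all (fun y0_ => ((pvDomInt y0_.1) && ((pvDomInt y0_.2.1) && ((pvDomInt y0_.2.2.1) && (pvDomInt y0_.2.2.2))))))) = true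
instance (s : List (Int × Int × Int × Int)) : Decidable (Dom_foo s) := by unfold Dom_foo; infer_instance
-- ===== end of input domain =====

-- B replaces A's per-point enumeration of all 81 offsets by four staged single-axis
-- dilation passes over the whole set (iterated Minkowski sum); objective: alternative.
-- Python B iterates over a set only to build another set, so its value is order-independent.


-- ===== PORT A =====
def foo (s : List (Int × Int × Int × Int)) : List (Int × Int × Int × Int) :=
  s.foldl (fun ss j =>
    let x := j.1; let y := j.2.1; let z := j.2.2.1; let w := j.2.2.2
    (PySem.List.pyRange (-1) 2 1).foldl (fun ss a =>
      (PySem.List.pyRange (-1) 2 1).foldl (fun ss b =>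
        (PySem.List.pyRange (-1) 2 1).foldl (fun ss c =>
          (PySem.List.pyRange (-1) 2 1).foldl (fun ss d =>
            PySem.Set.add ss (x + a, y + b, z + c, w + d)) ss) ss) ss) ss)
    PySem.Set.empty

-- ===== PORT B =====
-- helper 'shift' of Source B
def fooShift (p : Int × Int × Int × Int) (axis d : Int) : Int × Int × Int × Int :=
  if axis = 0 then (p.1 + d, p.2.1, p.2.2.1, p.2.2.2)
  else if axis = 1 then (p.1, p.2.1 + d, p.2.2.1, p.2.2.2)
  else if axis = 2 then (p.1, p.2.1, p.2.2.1 + d, p.2.2.2)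
  else (p.1, p.2.1, p.2.2.1, p.2.2.2 + d)

def foo_alt (s : List (Int × Int × Int × Int)) : List (Int × Int × Int × Int) :=
  let S0 : PySem.Set (Int × Int × Int × Int) :=
    PySem.Set.ofList (s.map (fun j => (j.1, j.2.1, j.2.2.1, j.2.2.2)))
  (PySem.List.pyRange 0 4 1).foldl (fun S axis =>
    PySem.Set.ofList (S.flatMap (fun p =>
      ([-1, 0, 1] : List Int).map (fun d => fooShift p axis d)))) S0

-- ===== PRECONDITION & SPEC =====
def Spec_foo (s : List (Int × Int × Int × Int)) (out : List (Int × Int × Int × Int)) : Prop := out = foo_alt s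
instance (s : List (Int × Int × Int × Int)) (out : List (Int × Int × Int × Int)) : Decidable (Spec_foo s out) := by unfold Spec_foo; infer_instance

-- ===== CLAIM (what is proved, stated in full; the proofs are below) =====
def Claim_equal_foo : Prop := ∀ (s : List (Int × Int × Int × Int)), Dom_foo s → Spec_foo s (foo s)

-- ===== LEMMAS AND PROOFS =====

-- updating a set with elements it already contains changes nothing
theorem pv_upd_sub {α : Type} [BEq α] [LawfulBEq α] (s : PySem.Set α) (m : List α)
    (h : ∀ y ∈ m, y ∈ s) : PySem.Set.update s m = s := by
  rw [PySem.Set.update_eq_append_filter]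
  have hnil : (PySem.Set.ofList m).filter (fun y => !(PySem.Set.contains s y)) = [] := by
    rw [List.filter_eq_nil_iff]
    intro a ha
    simp
    exact h _ ((PySem.Set.mem_ofList _ _).mp ha)
  rw [hnil, List.append_nil]

-- deduplicating the source list before a flatMap does not change the deduplicated image
theorem pv_upd_dedup_flatMap {α : Type} [BEq α] [LawfulBEq α] (g : α → List α) (L : List α) :
    ∀ s : PySem.Set α,
      PySem.Set.update s ((PySem.List.dedup L).flatMap g) = PySem.Set.update s (L.flatMap g) := by
  induction L with
  | nil => intro s; rfl
  | cons x L ih =>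
    intro s
    have hdl : PySem.List.dedup (x :: L) = x :: PySem.Set.discard (PySem.List.dedup L) x := by
      simp [PySem.Set.ofList_cons]
    rw [hdl]
    simp only [List.flatMap_cons, PySem.Set.update_append]
    rw [← ih (PySem.Set.update s (g x))]
    have key : ∀ (D : List α) (t : PySem.Set α), (∀ y ∈ g x, y ∈ t) →
        PySem.Set.update t ((PySem.Set.discard D x).flatMap g) = PySem.Set.update t (D.flatMap g) := by
      intro D
      induction D with
      | nil => intro t _; rfl
      | cons z D ihD =>
        intro t ht
        by_cases hz : z = x
        · subst hz
          have hdz : PySem.Set.discard (z :: D) z = PySem.Set.discard D z := by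
            simp [PySem.Set.discard]
          rw [hdz, List.flatMap_cons, PySem.Set.update_append, pv_upd_sub t (g z) ht, ihD t ht]
        · have hdz : PySem.Set.discard (z :: D) x = z :: PySem.Set.discard D x := by
            simp [PySem.Set.discard, hz]
          rw [hdz, List.flatMap_cons, List.flatMap_cons, PySem.Set.update_append,
            PySem.Set.update_append]
          exact ihD _ (fun y hy => (PySem.Set.mem_update _ _ _).mpr (Or.inl (ht y hy)))
    exact key _ _ (fun y hy => (PySem.Set.mem_update _ _ _).mpr (Or.inr hy))

theorem pv_ofList_flatMap_ofList {α : Type} [BEq α] [LawfulBEq α] (g : α → List α) (L : List α) :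
    PySem.Set.ofList ((PySem.Set.ofList L).flatMap g) = PySem.Set.ofList (L.flatMap g) := by
  have h := pv_upd_dedup_flatMap g L PySem.Set.empty
  simpa [PySem.List.dedup_eq_ofList, PySem.Set.update_nil_left] using h

-- one single-axis pass of B
def pvPass (axis : Int) (p : Int × Int × Int × Int) : List (Int × Int × Int × Int) :=
  ([-1, 0, 1] : List Int).map (fun d => fooShift p axis d)

-- the four chained single-axis passes applied to one point: exactly A's 81 lex-ordered neighbours
def pvChain (p : Int × Int × Int × Int) : List (Int × Int × Int × Int) :=
  (((pvPass 0 p).flatMap (pvPass 1)).flatMap (pvPass 2)).flatMap (pvPass 3)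

lemma pyRange_m1_2 : PySem.List.pyRange (-1) 2 1 = [-1, 0, 1] := by decide

lemma fooShift_0 (p : Int × Int × Int × Int) (d : Int) :
    fooShift p 0 d = (p.1 + d, p.2.1, p.2.2.1, p.2.2.2) := rfl
lemma fooShift_1 (p : Int × Int × Int × Int) (d : Int) :
    fooShift p 1 d = (p.1, p.2.1 + d, p.2.2.1, p.2.2.2) := rfl
lemma fooShift_2 (p : Int × Int × Int × Int) (d : Int) :
    fooShift p 2 d = (p.1, p.2.1, p.2.2.1 + d, p.2.2.2) := rfl
lemma fooShift_3 (p : Int × Int × Int × Int) (d : Int) :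
    fooShift p 3 d = (p.1, p.2.1, p.2.2.1, p.2.2.2 + d) := rfl

set_option maxHeartbeats 2000000 in
-- A's four nested loops over one point add exactly pvChain j, in that order
lemma a_step (ss : PySem.Set (Int × Int × Int × Int)) (j : Int × Int × Int × Int) :
    (PySem.List.pyRange (-1) 2 1).foldl (fun ss a =>
      (PySem.List.pyRange (-1) 2 1).foldl (fun ss b =>
        (PySem.List.pyRange (-1) 2 1).foldl (fun ss c =>
          (PySem.List.pyRange (-1) 2 1).foldl (fun ss d =>
            PySem.Set.add ss (j.1 + a, j.2.1 + b, j.2.2.1 + c, j.2.2.2 + d)) ss) ss) ss) ss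
    = (pvChain j).foldl PySem.Set.add ss := by
  simp only [pyRange_m1_2, pvChain, pvPass, fooShift_0, fooShift_1, fooShift_2, fooShift_3,
    List.map_cons, List.map_nil, List.flatMap_cons, List.flatMap_nil, List.append_nil,
    List.cons_append, List.nil_append, List.foldl_cons, List.foldl_nil]

lemma foldl_add_flatMap (f : (Int × Int × Int × Int) → List (Int × Int × Int × Int))
    (s : List (Int × Int × Int × Int)) :
    ∀ init : PySem.Set (Int × Int × Int × Int),
      (s.flatMap f).foldl PySem.Set.add init
      = s.foldl (fun ss j => (f j).foldl PySem.Set.add ss) init := by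
  induction s with
  | nil => intro init; rfl
  | cons j t ih =>
    intro init
    simp only [List.flatMap_cons, List.foldl_append, List.foldl_cons]
    exact ih _

-- A computes the deduplicated flat list of chained neighbours
lemma a_eq (s : List (Int × Int × Int × Int)) :
    foo s = PySem.Set.ofList (s.flatMap pvChain) := by
  unfold foo
  simp only [a_step]
  rw [PySem.Set.ofList, foldl_add_flatMap]

-- B computes the same deduplicated flat list
lemma b_eq (s : List (Int × Int × Int × Int)) :
    foo_alt s = PySem.Set.ofList (s.flatMap pvChain) := by
  unfold foo_alt
  have hmap : s.map (fun j => (j.1, j.2.1, j.2.2.1, j.2.2.2)) = s := by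
    simp
  have hr : PySem.List.pyRange 0 4 1 = [0, 1, 2, 3] := by decide
  rw [hmap, hr]
  simp only [List.foldl_cons, List.foldl_nil]
  simp only [pv_ofList_flatMap_ofList]
  simp only [List.flatMap_assoc]
  rfl

-- ===== VERDICT (by name: the statement is the Claim_ definition above) =====
theorem foo_spec : Claim_equal_foo := by
  intro s _
  show foo s = foo_alt s
  rw [a_eq, b_eq]
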